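-- pv_equiv track=rewrite | github.com/namloga/discrete_mathics | task1/src/task1.py | check_anti_transitive
-- ===== SOURCE A (Python) =====
-- from collections import defaultdict
--
-- def check_anti_transitive(S, R):
--     R_set = set(R)
--     forward_map = defaultdict(set)
--
--     for a, b in R:
--         if a != b:
--             forward_map[a].add(b)
--
--     for a, b in R:
--         if a == b:
--             continue
--         for c in forward_map.get(b, []):
--             if a != c and (a, c) in R_set:
--                 return False
--
--     return True
-- ===== SOURCE B (Python) =====
-- from collections import defaultdict
--
-- def check_anti_transitive(S, R):
--     forward = defaultdict(set)
--     backward = defaultdict(set)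
--     for a, b in R:
--         if a != b:
--             forward[a].add(b)
--             backward[b].add(a)
--     return not any(a != c and (forward.get(a, set()) & backward.get(c, set()))
--                    for a, c in R)
-- ===== Notes on version B (the rewrite author's own statement) =====
-- stated objective: alternative
-- what changed: Instead of scanning each edge's successor set against a membership set of R, B builds forward and backward adjacency maps in one pass and declares a violation when some edge (a,c) has a non-empty intersection forward[a] & backward[c] (a middle node).
import Mathlib
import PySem

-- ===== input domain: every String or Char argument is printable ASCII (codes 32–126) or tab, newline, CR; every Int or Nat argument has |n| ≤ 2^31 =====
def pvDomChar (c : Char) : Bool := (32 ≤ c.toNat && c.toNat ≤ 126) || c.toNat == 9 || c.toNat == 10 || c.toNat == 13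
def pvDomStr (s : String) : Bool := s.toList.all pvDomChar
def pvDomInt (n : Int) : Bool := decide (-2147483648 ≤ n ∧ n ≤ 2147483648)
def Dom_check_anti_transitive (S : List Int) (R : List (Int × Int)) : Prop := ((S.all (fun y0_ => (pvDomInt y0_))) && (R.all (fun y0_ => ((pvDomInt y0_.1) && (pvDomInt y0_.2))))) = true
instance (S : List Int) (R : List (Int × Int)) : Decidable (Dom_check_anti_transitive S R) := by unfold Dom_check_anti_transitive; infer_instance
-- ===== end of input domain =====

-- B replaces A's "successor set + membership test in R" scan by forward/backward
-- adjacency maps and an intersection test per edge (alternative decomposition).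


-- ===== PORT A =====
-- forward_map[a].add(b) for every (a,b) in R with a != b  (defaultdict(set))
def pvFwd (R : List (Int × Int)) : PySem.Dict Int (PySem.Set Int) :=
  R.foldl (fun d p => if p.1 ≠ p.2 then d.modify p.1 [] (fun s => PySem.Set.add s p.2) else d)
    PySem.Dict.empty

-- the second loop of A, with its early `return False`
def pvALoop (Rset : PySem.Set (Int × Int)) (fwd : PySem.Dict Int (PySem.Set Int)) :
    List (Int × Int) → Bool
  | [] => true
  | (a, b) :: rest =>
    if a = b then pvALoop Rset fwd rest
    else if (fwd.getD b []).any (fun c => a ≠ c && Rset.contains (a, c)) then false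
    else pvALoop Rset fwd rest

def check_anti_transitive (S : List Int) (R : List (Int × Int)) : Bool :=
  let Rset := PySem.Set.ofList R
  let fwd := pvFwd R
  pvALoop Rset fwd R

-- ===== PORT B =====
-- one pass building forward and backward adjacency maps (self-loops dropped)
def pvMaps (R : List (Int × Int)) :
    PySem.Dict Int (PySem.Set Int) × PySem.Dict Int (PySem.Set Int) :=
  R.foldl
    (fun fb p =>
      if p.1 ≠ p.2 then
        (fb.1.modify p.1 [] (fun s => PySem.Set.add s p.2),
         fb.2.modify p.2 [] (fun s => PySem.Set.add s p.1))
      else fb)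
    (PySem.Dict.empty, PySem.Dict.empty)

def check_anti_transitive_alt (S : List Int) (R : List (Int × Int)) : Bool :=
  let fb := pvMaps R
  !(R.any (fun p =>
      p.1 ≠ p.2 &&
        !(PySem.Set.inter (fb.1.getD p.1 []) (fb.2.getD p.2 [])).isEmpty))

-- ===== PRECONDITION & SPEC =====
def Spec_check_anti_transitive (S : List Int) (R : List (Int × Int)) (out : Bool) : Prop := out = check_anti_transitive_alt S R
instance (S : List Int) (R : List (Int × Int)) (out : Bool) : Decidable (Spec_check_anti_transitive S R out) := by unfold Spec_check_anti_transitive; infer_instance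

-- ===== CLAIM (what is proved, stated in full; the proofs are below) =====
def Claim_equal_check_anti_transitive : Prop := ∀ (S : List Int) (R : List (Int × Int)), Dom_check_anti_transitive S R → Spec_check_anti_transitive S R (check_anti_transitive S R)

-- ===== LEMMAS AND PROOFS =====

-- the common mathematical content: a violating triple exists in R
def pvTriple (R : List (Int × Int)) : Prop :=
  ∃ a b c, (a, b) ∈ R ∧ (b, c) ∈ R ∧ (a, c) ∈ R ∧ a ≠ b ∧ b ≠ c ∧ a ≠ c

-- membership in an adjacency map built by folding `modify key [] (add val)` over R
theorem pvAdj_fold_mem (key val : Int × Int → Int) (R : List (Int × Int))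
    (d : PySem.Dict Int (PySem.Set Int)) (b c : Int) :
    c ∈ ((R.foldl (fun d p => if p.1 ≠ p.2 then d.modify (key p) [] (fun s => PySem.Set.add s (val p)) else d) d).getD b [])
      ↔ c ∈ d.getD b [] ∨ ∃ p ∈ R, p.1 ≠ p.2 ∧ key p = b ∧ val p = c := by
  induction R generalizing d with
  | nil => simp
  | cons q rest ih =>
    simp only [List.foldl_cons]
    by_cases h : q.1 = q.2
    · rw [if_neg (not_not_intro h), ih]
      constructor
      · rintro (hd | ⟨p, hp, hne, hk, hv⟩)
        · exact Or.inl hd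
        · exact Or.inr ⟨p, List.mem_cons_of_mem _ hp, hne, hk, hv⟩
      · rintro (hd | ⟨p, hp, hne, hk, hv⟩)
        · exact Or.inl hd
        · rcases List.mem_cons.mp hp with rfl | hp'
          · exact absurd h hne
          · exact Or.inr ⟨p, hp', hne, hk, hv⟩
    · rw [if_pos h, ih, PySem.Dict.getD_modify]
      by_cases hb : b = key q
      · subst hb
        rw [if_pos rfl]
        constructor
        · rintro (hd | ⟨p, hp, hne, hk, hv⟩)
          · rcases (PySem.Set.mem_add _ _ _).mp hd with hd' | rfl
            · exact Or.inl hd'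
            · exact Or.inr ⟨q, List.mem_cons_self, h, rfl, rfl⟩
          · exact Or.inr ⟨p, List.mem_cons_of_mem _ hp, hne, hk, hv⟩
        · rintro (hd | ⟨p, hp, hne, hk, hv⟩)
          · exact Or.inl ((PySem.Set.mem_add _ _ _).mpr (Or.inl hd))
          · rcases List.mem_cons.mp hp with rfl | hp'
            · exact Or.inl ((PySem.Set.mem_add _ _ _).mpr (Or.inr hv.symm))
            · exact Or.inr ⟨p, hp', hne, hk, hv⟩
      · rw [if_neg hb]
        constructor
        · rintro (hd | ⟨p, hp, hne, hk, hv⟩)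
          · exact Or.inl hd
          · exact Or.inr ⟨p, List.mem_cons_of_mem _ hp, hne, hk, hv⟩
        · rintro (hd | ⟨p, hp, hne, hk, hv⟩)
          · exact Or.inl hd
          · rcases List.mem_cons.mp hp with rfl | hp'
            · exact absurd hk.symm hb
            · exact Or.inr ⟨p, hp', hne, hk, hv⟩

theorem pvFwd_mem (R : List (Int × Int)) (b c : Int) :
    c ∈ ((pvFwd R).getD b []) ↔ (b, c) ∈ R ∧ b ≠ c := by
  have h := pvAdj_fold_mem (fun p => p.1) (fun p => p.2) R PySem.Dict.empty b c
  simp only [PySem.Dict.getD_empty, List.not_mem_nil, false_or] at h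
  unfold pvFwd
  rw [h]
  constructor
  · rintro ⟨⟨x, y⟩, hp, hne, rfl, rfl⟩
    exact ⟨hp, hne⟩
  · rintro ⟨hm, hne⟩
    exact ⟨(b, c), hm, hne, rfl, rfl⟩

def pvBwdFold (R : List (Int × Int)) : PySem.Dict Int (PySem.Set Int) :=
  R.foldl (fun d p => if p.1 ≠ p.2 then d.modify p.2 [] (fun s => PySem.Set.add s p.1) else d)
    PySem.Dict.empty

theorem pvBwd_mem (R : List (Int × Int)) (c b : Int) :
    b ∈ ((pvBwdFold R).getD c []) ↔ (b, c) ∈ R ∧ b ≠ c := by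
  have h := pvAdj_fold_mem (fun p => p.2) (fun p => p.1) R PySem.Dict.empty c b
  simp only [PySem.Dict.getD_empty, List.not_mem_nil, false_or] at h
  unfold pvBwdFold
  rw [h]
  constructor
  · rintro ⟨⟨x, y⟩, hp, hne, rfl, rfl⟩
    exact ⟨hp, hne⟩
  · rintro ⟨hm, hne⟩
    exact ⟨(b, c), hm, hne, rfl, rfl⟩

-- B's paired fold is the forward fold paired with the backward fold
theorem pvMaps_eq (R : List (Int × Int)) : pvMaps R = (pvFwd R, pvBwdFold R) := by
  unfold pvMaps pvFwd pvBwdFold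
  generalize (PySem.Dict.empty : PySem.Dict Int (PySem.Set Int)) = e
  suffices h : ∀ (d1 d2 : PySem.Dict Int (PySem.Set Int)),
      R.foldl (fun fb p => if p.1 ≠ p.2 then
          (fb.1.modify p.1 [] (fun s => PySem.Set.add s p.2),
           fb.2.modify p.2 [] (fun s => PySem.Set.add s p.1)) else fb) (d1, d2)
        = (R.foldl (fun d p => if p.1 ≠ p.2 then d.modify p.1 [] (fun s => PySem.Set.add s p.2) else d) d1,
           R.foldl (fun d p => if p.1 ≠ p.2 then d.modify p.2 [] (fun s => PySem.Set.add s p.1) else d) d2) by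
    exact h e e
  induction R with
  | nil => intro d1 d2; rfl
  | cons q rest ih =>
    intro d1 d2
    simp only [List.foldl_cons]
    by_cases h : q.1 = q.2
    · rw [if_neg (not_not_intro h), if_neg (not_not_intro h), if_neg (not_not_intro h)]
      exact ih d1 d2
    · rw [if_pos h, if_pos h, if_pos h]
      exact ih _ _

-- A's loop returns true iff no edge in the remaining list witnesses a violation
theorem pvALoop_eq (Rset : PySem.Set (Int × Int)) (fwd : PySem.Dict Int (PySem.Set Int))
    (L : List (Int × Int)) :
    pvALoop Rset fwd L =
      !(L.any (fun p => p.1 ≠ p.2 &&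
          (fwd.getD p.2 []).any (fun c => p.1 ≠ c && Rset.contains (p.1, c)))) := by
  induction L with
  | nil => rfl
  | cons p rest ih =>
    obtain ⟨a, b⟩ := p
    simp only [pvALoop, List.any_cons]
    by_cases hab : a = b
    · rw [if_pos hab, ih]
      simp [hab]
    · rw [if_neg hab]
      by_cases hin : ((fwd.getD b []).any (fun c => a ≠ c && Rset.contains (a, c))) = true
      · rw [if_pos hin, hin, Bool.and_true]
        simp [hab]
      · rw [if_neg hin, ih]
        simp only [Bool.not_eq_true] at hin
        rw [hin, Bool.and_false, Bool.false_or]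

theorem pvA_iff (S : List Int) (R : List (Int × Int)) :
    check_anti_transitive S R = false ↔ pvTriple R := by
  unfold check_anti_transitive
  rw [pvALoop_eq]
  simp only [Bool.not_eq_false', List.any_eq_true, Bool.and_eq_true, decide_eq_true_eq,
    ne_eq, PySem.Set.contains_iff, PySem.Set.mem_ofList]
  constructor
  · rintro ⟨⟨a, b⟩, hab, hne, hany⟩
    simp only [List.any_eq_true, Bool.and_eq_true, decide_eq_true_eq, PySem.Set.contains_iff,
      PySem.Set.mem_ofList, ne_eq] at hany
    obtain ⟨c, hc, hac, hmem⟩ := hany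
    rw [pvFwd_mem] at hc
    exact ⟨a, b, c, hab, hc.1, hmem, by simpa using hne, hc.2, by simpa using hac⟩
  · rintro ⟨a, b, c, h1, h2, h3, hab, hbc, hac⟩
    refine ⟨(a, b), h1, by simpa using hab, ?_⟩
    simp only [List.any_eq_true, Bool.and_eq_true, decide_eq_true_eq, PySem.Set.contains_iff,
      PySem.Set.mem_ofList, ne_eq]
    exact ⟨c, (pvFwd_mem R b c).mpr ⟨h2, hbc⟩, by simpa using hac, h3⟩

theorem pvB_iff (S : List Int) (R : List (Int × Int)) :
    check_anti_transitive_alt S R = false ↔ pvTriple R := by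
  unfold check_anti_transitive_alt
  rw [pvMaps_eq]
  simp only [Bool.not_eq_false', List.any_eq_true, Bool.and_eq_true, decide_eq_true_eq,
    Bool.not_eq_true', List.isEmpty_eq_false_iff_exists_mem]
  constructor
  · rintro ⟨⟨a, c⟩, hac, hne, b, hb⟩
    rw [PySem.Set.mem_inter] at hb
    obtain ⟨h1, h2⟩ := hb
    rw [pvFwd_mem] at h1
    rw [pvBwd_mem] at h2
    exact ⟨a, b, c, h1.1, h2.1, hac, h1.2, h2.2, by simpa using hne⟩
  · rintro ⟨a, b, c, h1, h2, h3, hab, hbc, hac⟩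
    refine ⟨(a, c), h3, by simpa using hac, b, ?_⟩
    rw [PySem.Set.mem_inter]
    exact ⟨(pvFwd_mem R a b).mpr ⟨h1, hab⟩, (pvBwd_mem R c b).mpr ⟨h2, hbc⟩⟩

-- ===== VERDICT (by name: the statement is the Claim_ definition above) =====
theorem check_anti_transitive_spec : Claim_equal_check_anti_transitive := by
  intro S R _
  unfold Spec_check_anti_transitive
  cases hA : check_anti_transitive S R <;> cases hB : check_anti_transitive_alt S R
  · rfl
  · have h := (pvB_iff S R).mpr ((pvA_iff S R).mp hA)
    rw [hB] at h
    exact absurd h (by simp)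
  · have h := (pvA_iff S R).mpr ((pvB_iff S R).mp hB)
    rw [hA] at h
    exact absurd h (by simp)
  · rfl
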